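-- pv_equiv track=rewrite | github.com/AdityaJain1030/K4-free-graph-constructions | scripts/run_sat_near_regular_nonreg.py | _expand_neighbours
-- ===== SOURCE A (Python) =====
-- def _expand_neighbours(alphas: dict[int, list[int]], radius: int, n_range):
--     out: dict[int, list[int]] = {}
--     for n in n_range:
--         base = alphas.get(n, [])
--         if not base:
--             continue
--         vals = set()
--         for a in base:
--             for delta in range(-radius, radius + 1):
--                 v = a + delta
--                 if 1 <= v < n:
--                     vals.add(v)
--         out[n] = sorted(vals)
--     return out
-- ===== SOURCE B (Python) =====
-- def _expand_neighbours(alphas: dict[int, list[int]], radius: int, n_range):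
--     out: dict[int, list[int]] = {}
--     for n in n_range:
--         base = alphas.get(n, [])
--         if not base:
--             continue
--         # clip each interval [a-radius, a+radius] to [1, n-1], sort by lower end,
--         # then sweep once, emitting each covered value exactly once in order
--         ivs = sorted(((max(a - radius, 1), min(a + radius, n - 1)) for a in base),
--                      key=lambda iv: iv[0])
--         vals = []
--         prev = 0
--         for lo, hi in ivs:
--             start = max(lo, prev + 1)
--             if start <= hi:
--                 vals.extend(range(start, hi + 1))
--                 prev = hi
--         out[n] = vals
--     return out
-- ===== Notes on version B (the rewrite author's own statement) =====
-- stated objective: faster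
-- what changed: Instead of adding every a+delta over the full radius window to a set and sorting it, B clips each [a-radius, a+radius] interval to [1, n-1], sorts the intervals by lower end and sweeps them once, emitting each covered value exactly once in increasing order.
import Mathlib
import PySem

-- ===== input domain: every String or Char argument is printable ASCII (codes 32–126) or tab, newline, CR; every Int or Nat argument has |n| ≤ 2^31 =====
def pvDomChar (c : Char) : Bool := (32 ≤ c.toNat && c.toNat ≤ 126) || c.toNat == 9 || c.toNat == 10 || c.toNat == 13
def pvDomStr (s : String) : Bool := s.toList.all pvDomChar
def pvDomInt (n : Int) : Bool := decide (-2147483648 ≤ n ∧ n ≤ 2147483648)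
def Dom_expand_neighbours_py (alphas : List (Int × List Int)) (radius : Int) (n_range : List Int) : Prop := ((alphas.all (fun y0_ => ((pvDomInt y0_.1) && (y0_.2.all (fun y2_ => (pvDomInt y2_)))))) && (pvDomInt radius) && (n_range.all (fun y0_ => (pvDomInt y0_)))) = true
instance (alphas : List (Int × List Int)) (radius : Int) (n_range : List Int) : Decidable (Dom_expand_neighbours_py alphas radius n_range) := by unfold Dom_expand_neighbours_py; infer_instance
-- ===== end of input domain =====

-- B replaces A's per-value set-fill (every a ± delta added to a set, then sorted) by
-- sorting the clipped intervals [a-radius, a+radius] ∩ [1, n-1] and sweeping them once,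
-- emitting each covered value exactly once in increasing order (alternative algorithm).


-- ===== PORT A =====
-- inner loop body: 'v = a + delta; if 1 <= v < n: vals.add(v)'
def pvAddStep (n a : Int) (s : PySem.Set Int) (delta : Int) : PySem.Set Int :=
  if 1 ≤ a + delta ∧ a + delta < n then s.add (a + delta) else s

-- loop body of 'for n in n_range'
def pvAStep (alphas : List (Int × List Int)) (radius : Int)
    (out : PySem.Dict Int (List Int)) (n : Int) : PySem.Dict Int (List Int) :=
  let base := PySem.Dict.getD (PySem.Dict.mk alphas) n []
  if base = [] then out
  else
    let vals : PySem.Set Int :=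
      base.foldl (fun vals a =>
        (PySem.List.pyRange (-radius) (radius + 1) 1).foldl (pvAddStep n a) vals)
        PySem.Set.empty
    PySem.Dict.insert out n (PySem.List.sorted vals (fun x => x))

def expand_neighbours_py (alphas : List (Int × List Int)) (radius : Int) (n_range : List Int) : List (Int × List Int) :=
  (n_range.foldl (pvAStep alphas radius) (PySem.Dict.mk [])).items

-- ===== PORT B =====
-- loop body of 'for lo, hi in ivs' (state = (vals, prev))
def pvMergeStep (st : List Int × Int) (iv : Int × Int) : List Int × Int :=
  let start := max iv.1 (st.2 + 1)
  if start ≤ iv.2 then (st.1 ++ PySem.List.pyRange start (iv.2 + 1) 1, iv.2) else st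

-- loop body of 'for n in n_range'
def pvBStep (alphas : List (Int × List Int)) (radius : Int)
    (out : PySem.Dict Int (List Int)) (n : Int) : PySem.Dict Int (List Int) :=
  let base := PySem.Dict.getD (PySem.Dict.mk alphas) n []
  if base = [] then out
  else
    let ivs := PySem.List.sorted
      (base.map (fun a => (max (a - radius) 1, min (a + radius) (n - 1))))
      (fun iv => iv.1)
    let res := ivs.foldl pvMergeStep (([] : List Int), (0 : Int))
    PySem.Dict.insert out n res.1

def expand_neighbours_py_alt (alphas : List (Int × List Int)) (radius : Int) (n_range : List Int) : List (Int × List Int) :=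
  (n_range.foldl (pvBStep alphas radius) (PySem.Dict.mk [])).items

-- ===== PRECONDITION & SPEC =====
def Spec_expand_neighbours_py (alphas : List (Int × List Int)) (radius : Int) (n_range : List Int) (out : List (Int × List Int)) : Prop := out = expand_neighbours_py_alt alphas radius n_range
instance (alphas : List (Int × List Int)) (radius : Int) (n_range : List Int) (out : List (Int × List Int)) : Decidable (Spec_expand_neighbours_py alphas radius n_range out) := by unfold Spec_expand_neighbours_py; infer_instance

-- ===== CLAIM (what is proved, stated in full; the proofs are below) =====
def Claim_equal_expand_neighbours_py : Prop := ∀ (alphas : List (Int × List Int)) (radius : Int) (n_range : List Int), Dom_expand_neighbours_py alphas radius n_range → Spec_expand_neighbours_py alphas radius n_range (expand_neighbours_py alphas radius n_range)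

-- ===== LEMMAS AND PROOFS =====

-- two strictly increasing integer lists with the same members are equal
theorem pv_eq_of_pairwise_lt_of_mem_iff : ∀ (xs ys : List Int),
    xs.Pairwise (· < ·) → ys.Pairwise (· < ·) → (∀ v, v ∈ xs ↔ v ∈ ys) → xs = ys := by
  intro xs
  induction xs with
  | nil =>
    intro ys _ _ h
    cases ys with
    | nil => rfl
    | cons y yt => exact absurd ((h y).mpr (List.mem_cons_self)) (List.not_mem_nil)
  | cons x xt ih =>
    intro ys hx hy h
    cases ys with
    | nil => exact absurd ((h x).mp (List.mem_cons_self)) (List.not_mem_nil)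
    | cons y yt =>
      have hxy : x = y := by
        rcases List.mem_cons.mp ((h x).mp List.mem_cons_self) with h1 | h1
        · exact h1
        · rcases List.mem_cons.mp ((h y).mpr List.mem_cons_self) with h2 | h2
          · exact h2.symm
          · have := (List.pairwise_cons.mp hy).1 x h1
            have := (List.pairwise_cons.mp hx).1 y h2
            omega
      subst hxy
      have htail : ∀ v, v ∈ xt ↔ v ∈ yt := by
        intro v
        constructor
        · intro hv
          have hlt := (List.pairwise_cons.mp hx).1 v hv
          rcases List.mem_cons.mp ((h v).mp (List.mem_cons_of_mem _ hv)) with h1 | h1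
          · omega
          · exact h1
        · intro hv
          have hlt := (List.pairwise_cons.mp hy).1 v hv
          rcases List.mem_cons.mp ((h v).mpr (List.mem_cons_of_mem _ hv)) with h1 | h1
          · omega
          · exact h1
      rw [ih yt (List.pairwise_cons.mp hx).2 (List.pairwise_cons.mp hy).2 htail]

-- A side: membership and nodup of the inner delta-fold
theorem pv_mem_addFold (n a : Int) : ∀ (ds : List Int) (s : PySem.Set Int) (v : Int),
    v ∈ ds.foldl (pvAddStep n a) s ↔ v ∈ s ∨ ∃ d ∈ ds, v = a + d ∧ 1 ≤ v ∧ v < n := by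
  intro ds
  induction ds with
  | nil => intro s v; simp
  | cons d dt ih =>
    intro s v
    simp only [List.foldl_cons, ih, pvAddStep]
    split_ifs with hc
    · rw [PySem.Set.mem_add]
      constructor
      · rintro (⟨hs | rfl⟩ | ⟨e, he, rfl, h1, h2⟩)
        · exact Or.inl hs
        · exact Or.inr ⟨d, List.mem_cons_self, rfl, hc.1, hc.2⟩
        · exact Or.inr ⟨e, List.mem_cons_of_mem _ he, rfl, h1, h2⟩
      · rintro (hs | ⟨e, he, rfl, h1, h2⟩)
        · exact Or.inl (Or.inl hs)
        · rcases List.mem_cons.mp he with rfl | he'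
          · exact Or.inl (Or.inr rfl)
          · exact Or.inr ⟨e, he', rfl, h1, h2⟩
    · constructor
      · rintro (hs | ⟨e, he, rfl, h1, h2⟩)
        · exact Or.inl hs
        · exact Or.inr ⟨e, List.mem_cons_of_mem _ he, rfl, h1, h2⟩
      · rintro (hs | ⟨e, he, rfl, h1, h2⟩)
        · exact Or.inl hs
        · rcases List.mem_cons.mp he with rfl | he'
          · exact absurd ⟨h1, h2⟩ hc
          · exact Or.inr ⟨e, he', rfl, h1, h2⟩

theorem pv_nodup_addFold (n a : Int) : ∀ (ds : List Int) (s : PySem.Set Int),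
    s.Nodup → (ds.foldl (pvAddStep n a) s).Nodup := by
  intro ds
  induction ds with
  | nil => intro s hs; exact hs
  | cons d dt ih =>
    intro s hs
    simp only [List.foldl_cons, pvAddStep]
    split_ifs
    · exact ih _ (PySem.Set.nodup_add s (a + d) hs)
    · exact ih _ hs

-- A side: membership and nodup of the whole set built over base
theorem pv_mem_valsA (radius n : Int) : ∀ (base : List Int) (s : PySem.Set Int) (v : Int),
    v ∈ base.foldl (fun vals a => (PySem.List.pyRange (-radius) (radius + 1) 1).foldl (pvAddStep n a) vals) s
      ↔ v ∈ s ∨ ∃ a ∈ base, a - radius ≤ v ∧ v ≤ a + radius ∧ 1 ≤ v ∧ v < n := by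
  intro base
  induction base with
  | nil => intro s v; simp
  | cons a bt ih =>
    intro s v
    simp only [List.foldl_cons, ih, pv_mem_addFold, PySem.List.mem_pyRange_one]
    constructor
    · rintro (⟨hs | ⟨d, hd, rfl, h1, h2⟩⟩ | ⟨e, he, h⟩)
      · exact Or.inl hs
      · exact Or.inr ⟨a, List.mem_cons_self, by omega⟩
      · exact Or.inr ⟨e, List.mem_cons_of_mem _ he, h⟩
    · rintro (hs | ⟨e, he, h⟩)
      · exact Or.inl (Or.inl hs)
      · rcases List.mem_cons.mp he with rfl | he'
        · exact Or.inl (Or.inr ⟨v - e, by omega, by omega⟩)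
        · exact Or.inr ⟨e, he', h⟩

theorem pv_nodup_valsA (radius n : Int) : ∀ (base : List Int) (s : PySem.Set Int),
    s.Nodup →
    (base.foldl (fun vals a => (PySem.List.pyRange (-radius) (radius + 1) 1).foldl (pvAddStep n a) vals) s).Nodup := by
  intro base
  induction base with
  | nil => intro s hs; exact hs
  | cons a bt ih => intro s hs; exact ih _ (pv_nodup_addFold n a _ s hs)

-- B side: the sweep invariant
theorem pv_merge_inv : ∀ (ivs : List (Int × Int)) (acc : List Int) (prev : Int),
    acc.Pairwise (· < ·) →
    (∀ x ∈ acc, x ≤ prev) →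
    (∀ v, v ≤ prev → ∀ iv ∈ ivs, iv.1 ≤ v → v ∈ acc) →
    ivs.Pairwise (fun p q => p.1 ≤ q.1) →
    (ivs.foldl pvMergeStep (acc, prev)).1.Pairwise (· < ·) ∧
    (∀ x ∈ (ivs.foldl pvMergeStep (acc, prev)).1, x ≤ (ivs.foldl pvMergeStep (acc, prev)).2) ∧
    (∀ v, v ∈ (ivs.foldl pvMergeStep (acc, prev)).1 ↔ v ∈ acc ∨ ∃ iv ∈ ivs, iv.1 ≤ v ∧ v ≤ iv.2) := by
  intro ivs
  induction ivs with
  | nil =>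
    intro acc prev hpw hub _ _
    refine ⟨hpw, hub, ?_⟩
    simp
  | cons iv rest ih =>
    intro acc prev hpw hub hcov hsort
    obtain ⟨lo, hi⟩ := iv
    have hsort1 := (List.pairwise_cons.mp hsort).1
    have hsort2 := (List.pairwise_cons.mp hsort).2
    simp only [List.foldl_cons, pvMergeStep]
    set start := max lo (prev + 1) with hstart
    by_cases hle : start ≤ hi
    · simp only [if_pos hle]
      -- new state: acc ++ pyRange start (hi+1), prev' = hi
      have hpw' : (acc ++ PySem.List.pyRange start (hi + 1) 1).Pairwise (· < ·) := by
        rw [List.pairwise_append]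
        refine ⟨hpw, PySem.List.pairwise_lt_pyRange_one _ _, ?_⟩
        intro x hx y hy
        have := hub x hx
        have := (PySem.List.mem_pyRange_one.mp hy).1
        omega
      have hub' : ∀ x ∈ acc ++ PySem.List.pyRange start (hi + 1) 1, x ≤ hi := by
        intro x hx
        rcases List.mem_append.mp hx with hx | hx
        · have := hub x hx; omega
        · have := PySem.List.mem_pyRange_one.mp hx; omega
      have hcov' : ∀ v, v ≤ hi → ∀ jv ∈ rest, jv.1 ≤ v →
          v ∈ acc ++ PySem.List.pyRange start (hi + 1) 1 := by
        intro v hv jv hjv hjl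
        have hlo : lo ≤ jv.1 := hsort1 jv hjv
        by_cases hvp : v ≤ prev
        · exact List.mem_append.mpr (Or.inl (hcov v hvp (lo, hi) List.mem_cons_self (by omega)))
        · exact List.mem_append.mpr (Or.inr (PySem.List.mem_pyRange_one.mpr (by omega)))
      obtain ⟨r1, r2, r3⟩ := ih (acc ++ PySem.List.pyRange start (hi + 1) 1) hi hpw' hub' hcov' hsort2
      refine ⟨r1, r2, ?_⟩
      intro v
      rw [r3 v]
      constructor
      · rintro (hv | hv)
        · rcases List.mem_append.mp hv with hv | hv
          · exact Or.inl hv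
          · have := PySem.List.mem_pyRange_one.mp hv
            exact Or.inr ⟨(lo, hi), List.mem_cons_self, by simp; omega⟩
        · obtain ⟨jv, hjv, h⟩ := hv
          exact Or.inr ⟨jv, List.mem_cons_of_mem _ hjv, h⟩
      · rintro (hv | ⟨jv, hjv, h1, h2⟩)
        · exact Or.inl (List.mem_append.mpr (Or.inl hv))
        · rcases List.mem_cons.mp hjv with rfl | hjv'
          · by_cases hvp : v ≤ prev
            · exact Or.inl (List.mem_append.mpr (Or.inl (hcov v hvp (lo, hi) List.mem_cons_self h1)))
            · refine Or.inl (List.mem_append.mpr (Or.inr (PySem.List.mem_pyRange_one.mpr ?_)))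
              simp only at h1 h2
              omega
          · exact Or.inr ⟨jv, hjv', h1, h2⟩
    · simp only [if_neg hle]
      have hcov' : ∀ v, v ≤ prev → ∀ jv ∈ rest, jv.1 ≤ v → v ∈ acc := by
        intro v hv jv hjv hjl
        have hlo : lo ≤ jv.1 := hsort1 jv hjv
        exact hcov v hv (lo, hi) List.mem_cons_self (by omega)
      obtain ⟨r1, r2, r3⟩ := ih acc prev hpw hub hcov' hsort2
      refine ⟨r1, r2, ?_⟩
      intro v
      rw [r3 v]
      constructor
      · rintro (hv | ⟨jv, hjv, h⟩)
        · exact Or.inl hv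
        · exact Or.inr ⟨jv, List.mem_cons_of_mem _ hjv, h⟩
      · rintro (hv | ⟨jv, hjv, h1, h2⟩)
        · exact Or.inl hv
        · rcases List.mem_cons.mp hjv with rfl | hjv'
          · simp only at h1 h2
            refine Or.inl (hcov v (by omega) (lo, hi) List.mem_cons_self h1)
          · exact Or.inr ⟨jv, hjv', h1, h2⟩

-- the two per-n loop bodies agree
theorem pv_step_eq (alphas : List (Int × List Int)) (radius : Int)
    (out : PySem.Dict Int (List Int)) (n : Int) :
    pvAStep alphas radius out n = pvBStep alphas radius out n := by
  unfold pvAStep pvBStep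
  by_cases hb : PySem.Dict.getD (PySem.Dict.mk alphas) n [] = []
  · simp [hb]
  · simp only [if_neg hb]
    congr 1
    set base := PySem.Dict.getD (PySem.Dict.mk alphas) n [] with hbase
    set valsA := base.foldl (fun vals a =>
      (PySem.List.pyRange (-radius) (radius + 1) 1).foldl (pvAddStep n a) vals)
      PySem.Set.empty with hvalsA
    set ivs := PySem.List.sorted
      (base.map (fun a => (max (a - radius) 1, min (a + radius) (n - 1))))
      (fun iv => iv.1) with hivs
    -- B side facts
    have hsort : ivs.Pairwise (fun p q => p.1 ≤ q.1) :=
      PySem.List.sorted_pairwise _ _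
    have hone : ∀ iv ∈ ivs, 1 ≤ iv.1 := by
      intro iv hiv
      have := (PySem.List.mem_sorted _ _ _ _).mp hiv
      obtain ⟨a, _, rfl⟩ := List.mem_map.mp this
      simp only [le_max_iff]
      omega
    obtain ⟨bpw, _, bmem⟩ := pv_merge_inv ivs [] 0 List.Pairwise.nil
      (by simp) (by intro v hv iv hiv hl; exact absurd (hone iv hiv) (by omega)) hsort
    -- A side facts
    have apw : (PySem.List.sorted valsA (fun x => x)).Pairwise (· < ·) := by
      have h1 : (PySem.List.sorted valsA (fun x => x)).Pairwise (· ≤ ·) :=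
        PySem.List.sorted_pairwise _ _
      have h2 : (PySem.List.sorted valsA (fun x => x)).Nodup :=
        (PySem.List.sorted_perm valsA (fun x => x) false).nodup_iff.mpr
          (pv_nodup_valsA radius n base PySem.Set.empty List.nodup_nil)
      exact (h1.and h2).imp (fun h => lt_of_le_of_ne h.1 h.2)
    apply pv_eq_of_pairwise_lt_of_mem_iff _ _ apw bpw
    intro v
    rw [PySem.List.mem_sorted, pv_mem_valsA, bmem v]
    constructor
    · rintro (h | ⟨a, ha, h⟩)
      · simp [PySem.Set.empty] at h
      · refine Or.inr ⟨(max (a - radius) 1, min (a + radius) (n - 1)), ?_, by simp; omega, by simp; omega⟩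
        exact (PySem.List.mem_sorted _ _ _ _).mpr (List.mem_map.mpr ⟨a, ha, rfl⟩)
    · rintro (h | ⟨iv, hiv, h1, h2⟩)
      · simp at h
      · obtain ⟨a, ha, rfl⟩ := List.mem_map.mp ((PySem.List.mem_sorted _ _ _ _).mp hiv)
        simp only [max_le_iff, le_min_iff] at h1 h2
        exact Or.inr ⟨a, ha, by omega⟩

-- ===== VERDICT (by name: the statement is the Claim_ definition above) =====
theorem expand_neighbours_py_spec : Claim_equal_expand_neighbours_py := by
  intro alphas radius n_range _
  unfold Spec_expand_neighbours_py expand_neighbours_py expand_neighbours_py_alt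
  have h : pvAStep alphas radius = pvBStep alphas radius :=
    funext fun out => funext fun n => pv_step_eq alphas radius out n
  rw [h]
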